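-- pv_equiv track=rewrite | github.com/SmithE65/aoc-2025 | python/day01.py | right
-- ===== SOURCE A (Python) =====
-- def right(position, distance):
--     i = abs(distance)
--     result = 0
--     while i > 0:
--         position = (position + 1) % 100
--         if position == 0:
--             result += 1
--         i -= 1
--     return result
-- ===== SOURCE B (Python) =====
-- def right(position, distance):
--     i = abs(distance)
--     return (position + i) // 100 - position // 100
-- ===== Notes on version B (the rewrite author's own statement) =====
-- stated objective: faster
-- what changed: Replaces the O(|distance|) step-by-step loop with the closed form (position+|distance|)//100 - position//100.
import Mathlib
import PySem

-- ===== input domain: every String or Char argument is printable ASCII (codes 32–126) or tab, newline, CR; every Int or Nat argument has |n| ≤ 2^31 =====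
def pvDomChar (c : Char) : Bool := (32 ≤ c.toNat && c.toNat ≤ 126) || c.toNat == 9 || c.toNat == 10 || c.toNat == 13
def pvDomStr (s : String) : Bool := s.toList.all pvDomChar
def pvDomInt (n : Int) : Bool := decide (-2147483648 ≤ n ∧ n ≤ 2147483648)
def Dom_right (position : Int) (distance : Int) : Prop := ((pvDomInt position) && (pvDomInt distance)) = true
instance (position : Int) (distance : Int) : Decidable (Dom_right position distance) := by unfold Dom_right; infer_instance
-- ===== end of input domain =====

-- B replaces A's O(|distance|) stepping loop with a closed-form floor-division formula (faster).


-- ===== PORT A =====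
-- the while loop, counting i = |distance| down to 0, carrying (position, result)
def rightLoop : Nat → Int → Int → Int
  | 0, _, result => result
  | n + 1, position, result =>
      let position' := PySem.Int.mod (position + 1) 100
      rightLoop n position' (if position' = 0 then result + 1 else result)

def right (position : Int) (distance : Int) : Int :=
  rightLoop distance.natAbs position 0

-- ===== PORT B =====
def right_alt (position : Int) (distance : Int) : Int :=
  let i : Int := |distance|
  PySem.Int.floordiv (position + i) 100 - PySem.Int.floordiv position 100

-- ===== PRECONDITION & SPEC =====
def Spec_right (position : Int) (distance : Int) (out : Int) : Prop := out = right_alt position distance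
instance (position : Int) (distance : Int) (out : Int) : Decidable (Spec_right position distance out) := by unfold Spec_right; infer_instance

-- ===== CLAIM (what is proved, stated in full; the proofs are below) =====
def Claim_equal_right : Prop := ∀ (position : Int) (distance : Int), Dom_right position distance → Spec_right position distance (right position distance)

-- ===== LEMMAS AND PROOFS =====
theorem rightLoop_closed (n : Nat) (p r : Int) :
    rightLoop n p r = r + ((p + n) / 100 - p / 100) := by
  induction n generalizing p r with
  | zero => simp [rightLoop]
  | succ m ih =>
      rw [rightLoop]
      rw [ih]
      have h : PySem.Int.mod (p + 1) 100 = (p + 1) % 100 :=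
        PySem.Int.mod_eq_emod_of_pos (by norm_num)
      rw [h]
      split_ifs with h0 <;> push_cast <;> omega

theorem right_spec' (position distance : Int) :
    right position distance = right_alt position distance := by
  unfold right right_alt
  rw [rightLoop_closed]
  simp only [show ∀ a : Int, PySem.Int.floordiv a 100 = a / 100 from
    fun a => PySem.Int.floordiv_eq_ediv_of_pos (by norm_num), Int.abs_eq_natAbs]
  omega

-- ===== VERDICT (by name: the statement is the Claim_ definition above) =====
theorem right_spec : Claim_equal_right := by
  intro p d _
  unfold Spec_right
  exact right_spec' p d
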